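-- pv_equiv track=rewrite | github.com/rossby-sh/romsforge | packages/nipa_auto/src/preprocess/get_gfs.py | select_cumulative_lines
-- ===== SOURCE A (Python) =====
-- from typing import Any, List, Tuple, Optional
--
-- def grep_lines(lines: List[str], pattern: str) -> List[str]:
--     return [ln for ln in lines if pattern in ln]
--
-- def pick_interval_line(lines: List[str], fhr: int) -> Optional[str]:
--     """
--     pick line that matches (fhr-3)-(fhr) hour interval.
--     For cumulative vars we use fhr=3 => "0-3 hour".
--     """
--     if not lines:
--         return None
--     if fhr <= 0:
--         return lines[0]
--     a = fhr - 3
--     b = fhr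
--     key = f":{a}-{b} hour"
--     for ln in lines:
--         if key in ln:
--             return ln
--     return lines[0]
--
-- def select_cumulative_lines(inv_f003: List[str]) -> Tuple[dict, List[str]]:
--     """
--     cumulative/interval variables from f003 file (0-3 hour interval)
--     """
--     pat_swrad = ":DSWRF:surface:"
--     pat_lwrad = ":DLWRF:surface:"
--     pat_rain  = ":APCP:surface:"
--
--     def interval(pat: str) -> Optional[str]:
--         lines = grep_lines(inv_f003, pat)
--         return pick_interval_line(lines, fhr=3) if lines else None
--
--     sel = {}
--     sel["swrad"] = interval(pat_swrad)
--     sel["lwrad"] = interval(pat_lwrad)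
--     sel["rain"]  = interval(pat_rain)
--
--     required = ["swrad", "lwrad", "rain"]
--     missing = [k for k in required if sel.get(k) is None]
--     return sel, missing
-- ===== SOURCE B (Python) =====
-- from typing import List, Optional, Tuple
--
-- _KEY = ":0-3 hour"
--
-- def _upd(seen, itv, pat, ln):
--     # single-pass slot update: remember first line containing pat, and first containing pat AND the interval key
--     if pat in ln:
--         if seen is None:
--             seen = ln
--         if itv is None and _KEY in ln:
--             itv = ln
--     return seen, itv
--
-- def select_cumulative_lines(inv_f003: List[str]) -> Tuple[dict, List[str]]:
--     sw = (None, None); lw = (None, None); rn = (None, None)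
--     for ln in inv_f003:
--         sw = _upd(sw[0], sw[1], ":DSWRF:surface:", ln)
--         lw = _upd(lw[0], lw[1], ":DLWRF:surface:", ln)
--         rn = _upd(rn[0], rn[1], ":APCP:surface:", ln)
--     sel = {"swrad": sw[1] if sw[1] is not None else sw[0],
--            "lwrad": lw[1] if lw[1] is not None else lw[0],
--            "rain": rn[1] if rn[1] is not None else rn[0]}
--     missing = [k for k, v in sel.items() if v is None]
--     return sel, missing
-- ===== Notes on version B (the rewrite author's own statement) =====
-- stated objective: alternative
-- what changed: Replaces A's three grep-then-pick passes (filter per pattern, then a second scan for the ':0-3 hour' line) with a single pass over inv_f003 that maintains, per variable, first-seen and first-interval slots, then assembles sel and missing from those slots.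
import Mathlib
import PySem

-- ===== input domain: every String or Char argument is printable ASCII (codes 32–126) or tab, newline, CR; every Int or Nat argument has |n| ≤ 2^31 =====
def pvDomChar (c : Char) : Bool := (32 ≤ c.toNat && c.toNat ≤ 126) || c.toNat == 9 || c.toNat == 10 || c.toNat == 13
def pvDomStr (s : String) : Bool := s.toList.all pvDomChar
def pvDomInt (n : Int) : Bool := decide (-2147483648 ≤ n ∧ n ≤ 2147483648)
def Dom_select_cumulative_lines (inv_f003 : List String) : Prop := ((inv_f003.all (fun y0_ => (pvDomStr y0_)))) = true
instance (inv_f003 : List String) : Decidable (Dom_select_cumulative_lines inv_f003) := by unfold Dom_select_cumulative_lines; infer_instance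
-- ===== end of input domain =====

-- B replaces A's three grep-then-pick passes by ONE pass over inv_f003 that maintains, per
-- variable, the first matching line and the first matching line containing ":0-3 hour" (objective: alternative).


-- ===== PORT A =====
def pvGrepLines (lines : List String) (pattern : String) : List String :=
  lines.filter (fun ln => PySem.Str.isIn pattern ln)

def pvPickIntervalLine (lines : List String) (fhr : Int) : Option String :=
  match lines with
  | [] => none
  | l0 :: _ =>
    if fhr ≤ 0 then some l0
    else
      let key := ":" ++ PySem.Int.toStr (fhr - 3) ++ "-" ++ PySem.Int.toStr fhr ++ " hour"
      match lines.find? (fun ln => PySem.Str.isIn key ln) with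
      | some ln => some ln
      | none => some l0

def pvIntervalA (inv_f003 : List String) (pat : String) : Option String :=
  let lines := pvGrepLines inv_f003 pat
  if lines ≠ [] then pvPickIntervalLine lines 3 else none

def select_cumulative_lines (inv_f003 : List String) : (List (String × Option String)) × List String :=
  let sel : PySem.Dict String (Option String) :=
    ((PySem.Dict.empty.insert "swrad" (pvIntervalA inv_f003 ":DSWRF:surface:")).insert
        "lwrad" (pvIntervalA inv_f003 ":DLWRF:surface:")).insert
        "rain" (pvIntervalA inv_f003 ":APCP:surface:")
  let required := ["swrad", "lwrad", "rain"]
  let missing := required.filter (fun k => (PySem.Dict.get? sel k).getD none = none)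
  (sel.items, missing)

-- ===== PORT B =====
def pvUpd (seen itv : Option String) (pat ln : String) : Option String × Option String :=
  if PySem.Str.isIn pat ln then
    ((match seen with | none => some ln | some s => some s),
     (match itv with
      | none => if PySem.Str.isIn ":0-3 hour" ln then some ln else none
      | some i => some i))
  else (seen, itv)

-- fold state: ((sw_seen, sw_itv), (lw_seen, lw_itv), (rn_seen, rn_itv))
def pvStep (st : (Option String × Option String) × (Option String × Option String) ×
    (Option String × Option String)) (ln : String) :
    (Option String × Option String) × (Option String × Option String) ×
    (Option String × Option String) :=
  (pvUpd st.1.1 st.1.2 ":DSWRF:surface:" ln,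
   pvUpd st.2.1.1 st.2.1.2 ":DLWRF:surface:" ln,
   pvUpd st.2.2.1 st.2.2.2 ":APCP:surface:" ln)

def select_cumulative_lines_alt (inv_f003 : List String) : (List (String × Option String)) × List String :=
  let st := inv_f003.foldl pvStep ((none, none), (none, none), (none, none))
  let vSw := match st.1.2 with | some i => some i | none => st.1.1
  let vLw := match st.2.1.2 with | some i => some i | none => st.2.1.1
  let vRn := match st.2.2.2 with | some i => some i | none => st.2.2.1
  let sel := [("swrad", vSw), ("lwrad", vLw), ("rain", vRn)]
  let missing := (sel.filter (fun kv => kv.2.isNone)).map Prod.fst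
  (sel, missing)

-- ===== PRECONDITION & SPEC =====
def Spec_select_cumulative_lines (inv_f003 : List String) (out : (List (String × Option String)) × List String) : Prop := out = select_cumulative_lines_alt inv_f003
instance (inv_f003 : List String) (out : (List (String × Option String)) × List String) : Decidable (Spec_select_cumulative_lines inv_f003 out) := by unfold Spec_select_cumulative_lines; infer_instance

-- ===== CLAIM (what is proved, stated in full; the proofs are below) =====
def Claim_equal_select_cumulative_lines : Prop := ∀ (inv_f003 : List String), Dom_select_cumulative_lines inv_f003 → Spec_select_cumulative_lines inv_f003 (select_cumulative_lines inv_f003)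

-- ===== LEMMAS AND PROOFS =====

-- canonical value both programs compute per pattern: first key-line among matches, else first match
def pvCanon (L : List String) (pat : String) : Option String :=
  ((pvGrepLines L pat).find? (fun ln => PySem.Str.isIn ":0-3 hour" ln)).orElse
    (fun _ => (pvGrepLines L pat).head?)

lemma pvIntervalA_eq (L : List String) (pat : String) :
    pvIntervalA L pat = pvCanon L pat := by
  unfold pvIntervalA pvCanon
  cases h : pvGrepLines L pat with
  | nil => simp
  | cons l0 tl =>
    have hkey : (":" ++ PySem.Int.toStr ((3:Int) - 3) ++ "-" ++ PySem.Int.toStr 3 ++ " hour")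
        = ":0-3 hour" := rfl
    simp only [pvPickIntervalLine, hkey]
    norm_num
    cases hf : List.find? (fun ln => PySem.Chars.isIn [':', '0', '-', '3', ' ', 'h', 'o', 'u', 'r'] ln.toList) (l0 :: tl) <;>
      simp [hf]

lemma pvUpd_spec (L : List String) (pat : String) :
    ∀ (s i : Option String),
      L.foldl (fun p ln => pvUpd p.1 p.2 pat ln) (s, i)
        = (s.orElse (fun _ => (pvGrepLines L pat).head?),
           i.orElse (fun _ => (pvGrepLines L pat).find? (fun ln => PySem.Str.isIn ":0-3 hour" ln))) := by
  induction L with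
  | nil => intro s i; cases s <;> cases i <;> simp [pvGrepLines, Option.orElse]
  | cons ln tl ih =>
    intro s i
    simp only [List.foldl_cons, ih]
    by_cases hp : PySem.Chars.isIn pat.toList ln.toList
    · by_cases hk : PySem.Chars.isIn [':', '0', '-', '3', ' ', 'h', 'o', 'u', 'r'] ln.toList <;>
        cases s <;> cases i <;>
        simp [pvUpd, pvGrepLines, PySem.Str.isIn, hp, hk, Option.orElse]
    · cases s <;> cases i <;> simp [pvUpd, pvGrepLines, PySem.Str.isIn, hp, Option.orElse]

lemma pvFold_spec (L : List String) :
    L.foldl pvStep ((none, none), (none, none), (none, none))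
      = ((((pvGrepLines L ":DSWRF:surface:").head?,
           (pvGrepLines L ":DSWRF:surface:").find? (fun ln => PySem.Str.isIn ":0-3 hour" ln)),
          ((pvGrepLines L ":DLWRF:surface:").head?,
           (pvGrepLines L ":DLWRF:surface:").find? (fun ln => PySem.Str.isIn ":0-3 hour" ln)),
          ((pvGrepLines L ":APCP:surface:").head?,
           (pvGrepLines L ":APCP:surface:").find? (fun ln => PySem.Str.isIn ":0-3 hour" ln)))) := by
  have hsplit : ∀ (st : (Option String × Option String) × (Option String × Option String) ×
      (Option String × Option String)),
      L.foldl pvStep st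
        = (L.foldl (fun p ln => pvUpd p.1 p.2 ":DSWRF:surface:" ln) st.1,
           L.foldl (fun p ln => pvUpd p.1 p.2 ":DLWRF:surface:" ln) st.2.1,
           L.foldl (fun p ln => pvUpd p.1 p.2 ":APCP:surface:" ln) st.2.2) := by
    induction L with
    | nil => intro st; rfl
    | cons ln tl ih => intro st; simp only [List.foldl_cons, ih, pvStep]
  rw [hsplit]
  simp only [pvUpd_spec]
  simp [Option.orElse]

lemma pvAlt_canon (L : List String) :
    select_cumulative_lines_alt L
      = ([("swrad", pvCanon L ":DSWRF:surface:"), ("lwrad", pvCanon L ":DLWRF:surface:"),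
          ("rain", pvCanon L ":APCP:surface:")],
         ([("swrad", pvCanon L ":DSWRF:surface:"), ("lwrad", pvCanon L ":DLWRF:surface:"),
           ("rain", pvCanon L ":APCP:surface:")].filter (fun kv => kv.2.isNone)).map Prod.fst) := by
  unfold select_cumulative_lines_alt
  rw [pvFold_spec]
  unfold pvCanon
  cases (pvGrepLines L ":DSWRF:surface:").find? (fun ln => PySem.Str.isIn ":0-3 hour" ln) <;>
    cases (pvGrepLines L ":DLWRF:surface:").find? (fun ln => PySem.Str.isIn ":0-3 hour" ln) <;>
    cases (pvGrepLines L ":APCP:surface:").find? (fun ln => PySem.Str.isIn ":0-3 hour" ln) <;>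
      simp [Option.orElse]

lemma pvA_canon (L : List String) :
    select_cumulative_lines L
      = ([("swrad", pvCanon L ":DSWRF:surface:"), ("lwrad", pvCanon L ":DLWRF:surface:"),
          ("rain", pvCanon L ":APCP:surface:")],
         (["swrad", "lwrad", "rain"].filter (fun k =>
            (PySem.Dict.get? ⟨[("swrad", pvCanon L ":DSWRF:surface:"),
                               ("lwrad", pvCanon L ":DLWRF:surface:"),
                               ("rain", pvCanon L ":APCP:surface:")]⟩ k).getD none = none))) := by
  unfold select_cumulative_lines
  simp only [pvIntervalA_eq]
  rfl

theorem agree (L : List String) : select_cumulative_lines L = select_cumulative_lines_alt L := by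
  rw [pvA_canon, pvAlt_canon]
  cases pvCanon L ":DSWRF:surface:" <;> cases pvCanon L ":DLWRF:surface:" <;>
    cases pvCanon L ":APCP:surface:" <;> rfl

-- ===== VERDICT (by name: the statement is the Claim_ definition above) =====
theorem select_cumulative_lines_spec : Claim_equal_select_cumulative_lines := by
  intro L _
  unfold Spec_select_cumulative_lines
  exact agree L
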